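-- pv_equiv track=rewrite | github.com/sco1-archive/6-0002 | PS1/ps1a.py | greedy_cow_transport
-- ===== SOURCE A (Python) =====
-- def greedy_cow_transport(cows,limit=10):
--     """
--     Uses a greedy heuristic to determine an allocation of cows that attempts to
--     minimize the number of spaceship trips needed to transport all the cows. The
--     returned allocation of cows may or may not be optimal.
--     The greedy heuristic should follow the following method:
--
--     1. As long as the current trip can fit another cow, add the largest cow that will fit
--         to the trip
--     2. Once the trip is full, begin a new trip to transport the remaining cows
--
--     Does not mutate the given dictionary of cows.
--
--     Parameters:
--     cows - a dictionary of name (string), weight (int) pairs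
--     limit - weight limit of the spaceship (an int)
--
--     Returns:
--     A list of lists, with each inner list containing the names of cows
--     transported on a particular trip and the overall list containing all the
--     trips
--     """
--     n_cows = len(cows)  # Get total number of cows to transport
--     # Sort our cows by weight, heaviest to lightest
--     sortcows = sorted(cows, key=cows.get, reverse=True)  # Returns a sorted list
--
--     triplist = []  # Initialize our output list
--     while len(sortcows) > 0:  # Iterate until we run out of cows to take away
--         tripcows = []  # Cows on this trip
--         tripweight = 0  # Current trip weight
--
--         # Iterate through the available cows, adding the heaviest cow until we
--         # can't without going over the maximum trip weight
--         while tripweight < limit: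
--             for cow in sortcows:
--                 if cows[cow] + tripweight <= limit:
--                     tripcows.append(cow)  # Add cow to the current trip
--                     tripweight += cows[cow]  # Add cow's weight to current trip weight
--                     sortcows.remove(cow)  # Remove cow from the cow pool
--                     break  # Force restart of the for loop because we modified what it's iterating over
--             else:
--                 # No more cows can be added without exceeding the target weight,
--                 # send this trip
--                 break
--
--         triplist.append(tripcows)  # Add the current trip to the output list of trips
--
--     return triplist
-- ===== SOURCE B (Python) =====
-- def greedy_cow_transport(cows, limit=10):
--     # Keep the pool ascending by weight; pick each cow by binary search for the
--     # rightmost one that fits, instead of A's linear rescans of the whole pool.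
--     pool = sorted(cows.items(), key=lambda item: item[1], reverse=True)
--     pool.reverse()  # ascending; within equal weights the first-inserted is rightmost
--     trips = []
--     while pool:
--         names = []
--         cap = limit
--         while cap > 0:
--             # rightmost index with weight <= cap (weights are ascending)
--             lo = 0
--             hi = len(pool)
--             while lo < hi:
--                 mid = (lo + hi) // 2
--                 if pool[mid][1] <= cap:
--                     lo = mid + 1
--                 else:
--                     hi = mid
--             if lo == 0:
--                 break  # nothing fits
--             name, w = pool.pop(lo - 1)
--             names.append(name)
--             cap -= w
--         if not names:
--             break  # no cow fits inside an empty trip: stop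
--         trips.append(names)
--     return trips
-- ===== Notes on version B (the rewrite author's own statement) =====
-- stated objective: faster
-- what changed: A rescans the whole remaining pool with a Python for-loop plus list.remove for every cow it loads; B keeps the pool sorted ascending once and picks each cow by binary search for the rightmost one that fits, popping it by index, so the per-pick Python-level scan cost drops from O(n) to O(log n). Pre_ excludes duplicate cow names (a Python dict cannot carry them; the association-list ports would disagree with dict collapsing) and the inputs where A never returns (limit <= 0 or a cow heavier than limit: A's trip loads nothing and its while-loop spins forever).
import Mathlib
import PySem

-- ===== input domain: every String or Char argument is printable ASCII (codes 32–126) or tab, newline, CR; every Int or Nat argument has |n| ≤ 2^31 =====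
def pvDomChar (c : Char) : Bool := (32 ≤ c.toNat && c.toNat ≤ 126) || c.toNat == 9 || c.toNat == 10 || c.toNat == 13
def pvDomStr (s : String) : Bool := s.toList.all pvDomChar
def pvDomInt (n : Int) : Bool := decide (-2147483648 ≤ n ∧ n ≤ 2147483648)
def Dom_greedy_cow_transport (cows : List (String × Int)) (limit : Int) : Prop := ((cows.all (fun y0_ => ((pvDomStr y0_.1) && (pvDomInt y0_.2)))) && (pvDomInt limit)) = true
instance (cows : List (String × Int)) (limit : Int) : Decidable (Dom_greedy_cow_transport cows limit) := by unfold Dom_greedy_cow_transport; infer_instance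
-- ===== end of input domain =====

-- B replaces A's per-pick linear rescans of the pool by one ascending sorted pool
-- with a binary search for the rightmost fitting cow per pick (objective: faster).


-- Both Python loops are ported with a structural Nat fuel (initialised to the pool
-- length, which bounds the number of picks/trips): a pure totality guard.  Python A
-- loops forever exactly on the inputs Pre_ excludes; there the fuel runs out.

-- ===== PORT A =====
-- the `for cow in sortcows: if …: break / else: break` scan: first cow that fits
def pvFindA (d : PySem.Dict String Int) (limit tw : Int) : List String → Option String
  | [] => none
  | c :: rest => if d.getD c 0 + tw ≤ limit then some c else pvFindA d limit tw rest

-- A's inner `while tripweight < limit` loop, with `sortcows.remove(cow)` per pick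
def pvInnerA (d : PySem.Dict String Int) (limit : Int) :
    Nat → List String → List String → Int → List String × List String
  | 0, sortcows, tripcows, _ => (tripcows, sortcows)
  | fuel + 1, sortcows, tripcows, tw =>
    if tw < limit then
      match pvFindA d limit tw sortcows with
      | some c =>
        match PySem.List.remove? sortcows c with
        | some rest => pvInnerA d limit fuel rest (tripcows ++ [c]) (tw + d.getD c 0)
        | none => (tripcows, sortcows)   -- unreachable: the found cow is in the pool
      | none => (tripcows, sortcows)
    else (tripcows, sortcows)

-- A's outer `while len(sortcows) > 0` loop
def pvOuterA (d : PySem.Dict String Int) (limit : Int) :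
    Nat → List String → List (List String) → List (List String)
  | 0, _, acc => acc
  | fuel + 1, sortcows, acc =>
    if 0 < sortcows.length then
      match pvInnerA d limit sortcows.length sortcows [] 0 with
      | (trip, rest) => pvOuterA d limit fuel rest (acc ++ [trip])
    else acc

def greedy_cow_transport (cows : List (String × Int)) (limit : Int) : List (List String) :=
  let d := PySem.Dict.mk cows
  -- n_cows = len(cows) is computed by A but never used
  let sortcows := PySem.List.sorted d.keys (fun c => d.getD c 0) true
  pvOuterA d limit sortcows.length sortcows []

-- ===== PORT B =====
-- the hand-written `while lo < hi` binary search of Source B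
def pvBsearch (pool : List (String × Int)) (cap : Int) : Nat → Nat → Nat → Nat
  | 0, lo, _ => lo
  | fuel + 1, lo, hi =>
    if lo < hi then
      if (PySem.List.pyGetD pool (((lo + hi) / 2 : Nat) : Int) ("", 0)).2 ≤ cap then
        pvBsearch pool cap fuel ((lo + hi) / 2 + 1) hi
      else pvBsearch pool cap fuel lo ((lo + hi) / 2)
    else lo

-- Source B's inner `while cap > 0` loop: binary-search the pick, pop it by index
def pvInnerB (limit : Int) :
    Nat → List (String × Int) → List String → Int → List String × List (String × Int)
  | 0, pool, names, _ => (names, pool)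
  | fuel + 1, pool, names, cap =>
    if 0 < cap then
      if pvBsearch pool cap pool.length 0 pool.length = 0 then (names, pool)
      else
        match PySem.List.pop? pool ((pvBsearch pool cap pool.length 0 pool.length : Int) - 1) with
        | some (c, pool') => pvInnerB limit fuel pool' (names ++ [c.1]) (cap - c.2)
        | none => (names, pool)   -- unreachable: the index is in range
    else (names, pool)

-- Source B's outer `while pool` loop with its `if not names: break`
def pvOuterB (limit : Int) :
    Nat → List (String × Int) → List (List String) → List (List String)
  | 0, _, trips => trips
  | fuel + 1, pool, trips =>
    if pool = [] then trips
    else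
      match pvInnerB limit pool.length pool [] limit with
      | (names, rest) =>
        if names = [] then trips
        else pvOuterB limit fuel rest (trips ++ [names])

def greedy_cow_transport_alt (cows : List (String × Int)) (limit : Int) : List (List String) :=
  let pool := (PySem.List.sorted cows (fun item => item.2) true).reverse
  pvOuterB limit pool.length pool []

-- ===== PRECONDITION & SPEC =====
-- Pre_ excludes (i) duplicate cow names — a Python dict cannot carry them, so the
-- association-list argument is collapsed by dict() before A ever sees it — and
-- (ii) the inputs where A loops forever: a nonempty pool with limit <= 0 or with
-- some cow heavier than limit makes a trip that loads nothing, so A never returns.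
def Pre_greedy_cow_transport (cows : List (String × Int)) (limit : Int) : Prop :=
  (cows.map Prod.fst).Nodup ∧ (cows = [] ∨ (0 < limit ∧ ∀ p ∈ cows, p.2 ≤ limit))
instance (cows : List (String × Int)) (limit : Int) : Decidable (Pre_greedy_cow_transport cows limit) := by
  unfold Pre_greedy_cow_transport; infer_instance

def pvWitness_greedy_cow_transport : (List (String × Int)) × Int := ([("a", 3), ("b", 1)], 4)

def Spec_greedy_cow_transport (cows : List (String × Int)) (limit : Int) (out : List (List String)) : Prop := out = greedy_cow_transport_alt cows limit
instance (cows : List (String × Int)) (limit : Int) (out : List (List String)) : Decidable (Spec_greedy_cow_transport cows limit out) := by unfold Spec_greedy_cow_transport; infer_instance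

-- ===== CLAIM (what is proved, stated in full; the proofs are below) =====
def Claim_equal_greedy_cow_transport : Prop := ∀ (cows : List (String × Int)) (limit : Int), Dom_greedy_cow_transport cows limit → Pre_greedy_cow_transport cows limit → Spec_greedy_cow_transport cows limit (greedy_cow_transport cows limit)

-- ===== LEMMAS AND PROOFS =====

-- stable descending sorts of the pairs (by weight) and of the names (by lookup) align
theorem pv_map_fst_insertBy (f : String → Int) (x : String × Int) (ys : List (String × Int))
    (hx : f x.1 = x.2) (hys : ∀ p ∈ ys, f p.1 = p.2) :
    (PySem.List.insertBy (fun a b => decide (b.2 < a.2)) x ys).map Prod.fst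
      = PySem.List.insertBy (fun a b => decide (f b < f a)) x.1 (ys.map Prod.fst) := by
  induction ys with
  | nil => simp [PySem.List.insertBy]
  | cons y ys ih =>
    have hy : f y.1 = y.2 := hys y (by simp)
    have ih' := ih (fun p hp => hys p (by simp [hp]))
    by_cases hc : y.2 < x.2
    · simp [PySem.List.insertBy, hc, hx, hy]
    · simp [PySem.List.insertBy, hc, hx, hy, ih']

theorem pv_sorted_fst (cowsL : List (String × Int)) (f : String → Int)
    (h : ∀ p ∈ cowsL, f p.1 = p.2) :
    PySem.List.sorted (cowsL.map Prod.fst) f true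
      = (PySem.List.sorted cowsL (fun p => p.2) true).map Prod.fst := by
  rw [PySem.List.sorted_rev_eq_foldl_insertBy, PySem.List.sorted_rev_eq_foldl_insertBy]
  have aux : ∀ (l acc : List (String × Int)), (∀ p ∈ l, f p.1 = p.2) → (∀ p ∈ acc, f p.1 = p.2) →
      (l.foldl (fun acc x => PySem.List.insertBy (fun a b => decide (Prod.snd b < Prod.snd a)) x acc) acc).map Prod.fst
        = (l.map Prod.fst).foldl (fun acc x => PySem.List.insertBy (fun a b => decide (f b < f a)) x acc) (acc.map Prod.fst) := by
    intro l
    induction l with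
    | nil => intro acc _ _; rfl
    | cons x l ih =>
      intro acc hl hacc
      have hx : f x.1 = x.2 := hl x (by simp)
      have hacc' : ∀ p ∈ PySem.List.insertBy (fun a b => decide (Prod.snd b < Prod.snd a)) x acc, f p.1 = p.2 := by
        intro p hp
        rcases (PySem.List.mem_insertBy _ _ _ _).mp hp with h | h
        · subst h; exact hx
        · exact hacc p h
      simp only [List.foldl_cons, List.map_cons]
      rw [ih _ (fun p hp => hl p (by simp [hp])) hacc',
        pv_map_fst_insertBy f x acc hx hacc]
  simpa using (aux cowsL [] h (by simp)).symm

-- A's scan over names is find? over the weight pairs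
theorem pv_findA_pairs (d : PySem.Dict String Int) (limit tw : Int) :
    ∀ L : List (String × Int), (∀ p ∈ L, d.getD p.1 0 = p.2) →
    pvFindA d limit tw (L.map Prod.fst)
      = (L.find? (fun p => decide (p.2 + tw ≤ limit))).map Prod.fst := by
  intro L
  induction L with
  | nil => intro _; simp [pvFindA]
  | cons p L ih =>
    intro h
    have hp : d.getD p.1 0 = p.2 := h p (by simp)
    by_cases hc : p.2 + tw ≤ limit
    · simp [pvFindA, hp, hc]
    · simp [pvFindA, hp, hc, ih (fun q hq => h q (by simp [hq]))]

-- the binary search finds the fits/misfits boundary of an ascending pool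
theorem pv_bsearch_eq (cap : Int) (F G : List (String × Int))
    (hF : ∀ p ∈ F, p.2 ≤ cap) (hG : ∀ p ∈ G, cap < p.2) :
    ∀ (fuel lo hi : Nat), hi - lo ≤ fuel → lo ≤ F.length → F.length ≤ hi → hi ≤ F.length + G.length →
    pvBsearch (F ++ G) cap fuel lo hi = F.length := by
  intro fuel
  induction fuel with
  | zero =>
    intro lo hi hk h1 h2 h3
    simp only [pvBsearch]
    omega
  | succ k ih =>
    intro lo hi hk h1 h2 h3
    simp only [pvBsearch]
    by_cases hlh : lo < hi
    · rw [if_pos hlh]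
      have hmid1 : lo ≤ (lo + hi) / 2 := by omega
      have hmid2 : (lo + hi) / 2 < hi := by omega
      have hlen : (lo + hi) / 2 < (F ++ G).length := by
        simp only [List.length_append]; omega
      rw [PySem.List.pyGetD_natCast, List.getD_eq_getElem _ _ hlen]
      by_cases hmf : (lo + hi) / 2 < F.length
      · rw [List.getElem_append_left hmf]
        rw [if_pos (hF _ (List.getElem_mem _))]
        exact ih ((lo + hi) / 2 + 1) hi (by omega) (by omega) (by omega) (by omega)
      · have hge : F.length ≤ (lo + hi) / 2 := by omega
        rw [List.getElem_append_right hge]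
        have hmem : G[(lo + hi) / 2 - F.length]'(by simp only [List.length_append] at hlen; omega) ∈ G :=
          List.getElem_mem _
        rw [if_neg (by have := hG _ hmem; omega)]
        exact ih lo ((lo + hi) / 2) (by omega) (by omega) (by omega) (by omega)
    · rw [if_neg hlh]
      omega

-- on an ascending pool everything the takeWhile drops is too heavy
theorem pv_dropWhile_gt (cap : Int) : ∀ Q : List (String × Int),
    Q.Pairwise (fun a b => a.2 ≤ b.2) →
    ∀ x ∈ Q.dropWhile (fun p => decide (p.2 ≤ cap)), cap < x.2 := by
  intro Q h
  induction Q with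
  | nil => simp
  | cons a t ih =>
    rw [List.pairwise_cons] at h
    obtain ⟨ha, ht⟩ := h
    by_cases hc : a.2 ≤ cap
    · rw [List.dropWhile_cons_of_pos (by simpa using hc)]
      exact ih ht
    · rw [List.dropWhile_cons_of_neg (by simpa using hc)]
      intro x hx
      rcases List.mem_cons.mp hx with rfl | hx
      · omega
      · have := ha x hx; omega

-- one pick of Source B's inner loop: pop the last element of the fitting prefix
theorem pv_innerB_pick (limit cap : Int) (names : List String) (fb : Nat) (F G : List (String × Int))
    (hcap : 0 < cap) (hF : ∀ p ∈ F, p.2 ≤ cap) (hG : ∀ p ∈ G, cap < p.2) (hFne : F ≠ []) :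
    pvInnerB limit (fb + 1) (F ++ G) names cap
      = pvInnerB limit fb (F.dropLast ++ G) (names ++ [(F.getLast hFne).1]) (cap - (F.getLast hFne).2) := by
  have hFpos : 0 < F.length := List.length_pos_of_ne_nil hFne
  have hb : pvBsearch (F ++ G) cap (F ++ G).length 0 (F ++ G).length = F.length := by
    exact pv_bsearch_eq cap F G hF hG (F ++ G).length 0 (F ++ G).length (by omega)
      (by omega) (by simp) (by simp)
  have hidx : ((F.length : Int) - 1) = ((F.length - 1 : Nat) : Int) := by omega
  have hlt : F.length - 1 < (F ++ G).length := by simp only [List.length_append]; omega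
  have hpop : PySem.List.pop? (F ++ G) ((pvBsearch (F ++ G) cap (F ++ G).length 0 (F ++ G).length : Int) - 1)
      = some ((F ++ G)[F.length - 1], (F ++ G).eraseIdx (F.length - 1)) := by
    rw [hb, hidx]
    exact PySem.List.pop?_natCast (F ++ G) (F.length - 1) hlt
  have hget : (F ++ G)[F.length - 1]'hlt = F.getLast hFne := by
    rw [List.getElem_append_left (by omega)]
    exact (List.getLast_eq_getElem hFne).symm
  have herase : (F ++ G).eraseIdx (F.length - 1) = F.dropLast ++ G := by
    rw [List.eraseIdx_append_of_lt_length (by omega)]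
    congr 1
    conv_lhs => rw [← List.dropLast_append_getLast hFne]
    rw [List.eraseIdx_append_of_length_le (by simp [List.length_dropLast])]
    simp [List.length_dropLast]
  conv_lhs => rw [pvInnerB]
  rw [if_pos hcap, if_neg (by rw [hb]; omega)]
  split
  · rename_i c pool' hp
    rw [hpop] at hp
    obtain ⟨h1, h2⟩ := Prod.mk.injEq .. ▸ (Option.some.inj hp)
    rw [← h1, ← h2, hget, herase]
  · rename_i hp
    rw [hpop] at hp
    simp at hp

-- Source B's inner loop stops when nothing fits
theorem pv_innerB_stop (limit cap : Int) (names : List String) (fb : Nat) (G : List (String × Int))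
    (hG : ∀ p ∈ G, cap < p.2) :
    pvInnerB limit fb G names cap = (names, G) := by
  cases fb with
  | zero => rfl
  | succ k =>
    rw [pvInnerB]
    by_cases hcap : 0 < cap
    · rw [if_pos hcap]
      have hb : pvBsearch G cap G.length 0 G.length = 0 := by
        have := pv_bsearch_eq cap [] G (by simp) hG G.length 0 G.length (by simp) (by simp) (by simp) (by simp)
        simpa using this
      rw [if_pos hb]
    · rw [if_neg hcap]

theorem pv_pop?_sublist {α : Type} (xs : List α) (i : Int) (r : α × List α)
    (h : PySem.List.pop? xs i = some r) : r.2.Sublist xs := by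
  simp only [PySem.List.pop?] at h
  cases hk : PySem.List.pyIdx? xs.length i with
  | none => rw [hk] at h; simp at h
  | some k =>
    rw [hk] at h
    simp only [Option.bind_some] at h
    cases hx : xs[k]? with
    | none => rw [hx] at h; simp at h
    | some x =>
      rw [hx] at h
      simp only [Option.map_some, Option.some.injEq] at h
      subst h
      exact List.eraseIdx_sublist xs k

-- each loaded name costs exactly one pool element
theorem pvInnerB_len (limit : Int) : ∀ (fuel : Nat) (pool : List (String × Int)) (names : List String) (cap : Int),
    pool.length ≤ fuel →
    (pvInnerB limit fuel pool names cap).1.length + (pvInnerB limit fuel pool names cap).2.length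
      = names.length + pool.length := by
  intro fuel
  induction fuel with
  | zero => intro pool names cap _; simp [pvInnerB]
  | succ m ih =>
    intro pool names cap hn
    rw [pvInnerB]
    split
    · split
      · simp
      · split
        · rename_i c pool' hp
          have h := PySem.List.length_of_pop?_eq_some pool hp
          simp only at h
          have := ih pool' (names ++ [c.1]) (cap - c.2) (by omega)
          simp only [List.length_append, List.length_cons, List.length_nil] at this ⊢
          omega
        · simp
    · simp

theorem pv_innerB_sublist (limit : Int) : ∀ (fuel : Nat) (pool : List (String × Int)) (names : List String) (cap : Int),
    (pvInnerB limit fuel pool names cap).2.Sublist pool := by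
  intro fuel
  induction fuel with
  | zero => intro pool names cap; exact List.Sublist.refl _
  | succ m ih =>
    intro pool names cap
    rw [pvInnerB]
    split
    · split
      · exact List.Sublist.refl _
      · split
        · rename_i c pool' hp
          exact (ih pool' (names ++ [c.1]) (cap - c.2)).trans (pv_pop?_sublist pool _ _ hp)
        · exact List.Sublist.refl _
    · exact List.Sublist.refl _

theorem pv_innerB_names_prefix (limit : Int) : ∀ (fuel : Nat) (pool : List (String × Int)) (names : List String) (cap : Int),
    ∃ t, (pvInnerB limit fuel pool names cap).1 = names ++ t := by
  intro fuel
  induction fuel with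
  | zero => intro pool names cap; exact ⟨[], by simp [pvInnerB]⟩
  | succ m ih =>
    intro pool names cap
    rw [pvInnerB]
    split
    · split
      · exact ⟨[], by simp⟩
      · split
        · rename_i c pool' hp
          obtain ⟨t, ht⟩ := ih pool' (names ++ [c.1]) (cap - c.2)
          exact ⟨[c.1] ++ t, by rw [ht]; simp⟩
        · exact ⟨[], by simp⟩
    · exact ⟨[], by simp⟩

-- MAIN trip lemma: one trip of A on the descending name pool equals one trip of B
-- on the ascending pair pool (A's pool is the reverse of B's, projected to names)
theorem pv_trip_eq (d : PySem.Dict String Int) (limit : Int) :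
    ∀ (n : Nat) (Q : List (String × Int)) (names : List String) (tw : Int) (fA fB : Nat),
    Q.length ≤ n → Q.length ≤ fA → Q.length ≤ fB →
    Q.Pairwise (fun a b => a.2 ≤ b.2) →
    (∀ p ∈ Q, d.getD p.1 0 = p.2) →
    (Q.map Prod.fst).Nodup →
    pvInnerA d limit fA (Q.reverse.map Prod.fst) names tw
      = ((pvInnerB limit fB Q names (limit - tw)).1,
         (pvInnerB limit fB Q names (limit - tw)).2.reverse.map Prod.fst) := by
  intro n
  induction n with
  | zero =>
    intro Q names tw fA fB hlen _ _ _ _ _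
    have hQ : Q = [] := List.length_eq_zero_iff.mp (Nat.le_zero.mp hlen)
    subst hQ
    cases fA with
    | zero =>
      cases fB with
      | zero => rfl
      | succ b => simp [pvInnerA, pvInnerB, pvBsearch]
    | succ a =>
      cases fB with
      | zero => simp [pvInnerA, pvInnerB, pvFindA]
      | succ b => simp [pvInnerA, pvInnerB, pvBsearch, pvFindA]
  | succ m ih =>
    intro Q names tw fA fB hlen hfA hfB hasc hcons hnodup
    by_cases hQnil : Q = []
    · subst hQnil
      exact ih [] names tw fA fB (by simp) hfA hfB hasc hcons hnodup
    · have hQpos : 0 < Q.length := List.length_pos_of_ne_nil hQnil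
      obtain ⟨a, rfl⟩ : ∃ a, fA = a + 1 := ⟨fA - 1, by omega⟩
      obtain ⟨b, rfl⟩ : ∃ b, fB = b + 1 := ⟨fB - 1, by omega⟩
      by_cases htw : tw < limit
      · -- the trip can still take weight: both sides look for the pick
        have hcap : 0 < limit - tw := by omega
        set F := Q.takeWhile (fun p => decide (p.2 ≤ limit - tw)) with hFdef
        set G := Q.dropWhile (fun p => decide (p.2 ≤ limit - tw)) with hGdef
        have hFG : F ++ G = Q := List.takeWhile_append_dropWhile
        have hF : ∀ p ∈ F, p.2 ≤ limit - tw := by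
          intro p hp; have := List.mem_takeWhile_imp hp; simpa using this
        have hG : ∀ p ∈ G, limit - tw < p.2 := pv_dropWhile_gt (limit - tw) Q hasc
        have hQrev : Q.reverse = G.reverse ++ F.reverse := by
          rw [← hFG, List.reverse_append]
        have hpred : (fun p : String × Int => decide (p.2 + tw ≤ limit))
            = (fun p : String × Int => decide (p.2 ≤ limit - tw)) := by
          funext p; rw [decide_eq_decide]; omega
        have hfind := pv_findA_pairs d limit tw Q.reverse
          (fun p hp => hcons p (List.mem_reverse.mp hp))
        by_cases hFne : F = []
        · -- nothing fits: the trip ends on both sides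
          have hGQ : G = Q := by rw [← hFG, hFne, List.nil_append]
          have hnone : pvFindA d limit tw (Q.reverse.map Prod.fst) = none := by
            rw [hfind, hpred]
            rw [List.find?_eq_none.mpr (fun x hx => by
              have := hG x (by rw [hGQ]; exact List.mem_reverse.mp hx)
              simpa using by omega)]
            rfl
          rw [pvInnerA, if_pos htw]
          rw [pv_innerB_stop limit (limit - tw) names (b + 1) Q (fun p hp => hG p (by rw [hGQ]; exact hp))]
          split
          · rename_i c hf; rw [hnone] at hf; cases hf
          · rfl
        · -- pick the rightmost fitting cow = first fitting in the descending pool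
          have hc : F.getLast hFne ∈ F := List.getLast_mem hFne
          have hcQ : F.getLast hFne ∈ Q := by rw [← hFG]; exact List.mem_append_left _ hc
          have hrevF : F.reverse = F.getLast hFne :: F.dropLast.reverse := by
            conv_lhs => rw [← List.dropLast_append_getLast hFne]
            simp
          have hfindsome : pvFindA d limit tw (Q.reverse.map Prod.fst) = some (F.getLast hFne).1 := by
            rw [hfind, hpred, hQrev, List.find?_append,
              List.find?_eq_none.mpr (fun x hx => by
                have := hG x (List.mem_reverse.mp hx); simpa using by omega),
              Option.none_or, hrevF, List.find?_cons_of_pos (by simpa using hF _ hc)]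
            rfl
          have hQmapsplit : Q.reverse.map Prod.fst
              = G.reverse.map Prod.fst ++ ((F.getLast hFne).1 :: F.dropLast.reverse.map Prod.fst) := by
            rw [hQrev, List.map_append, hrevF, List.map_cons]
          have hnotinG : (F.getLast hFne).1 ∉ G.reverse.map Prod.fst := by
            intro hmem
            have hnd : (F.map Prod.fst ++ G.map Prod.fst).Nodup := by
              rw [← List.map_append, hFG]; exact hnodup
            have hdis := List.disjoint_of_nodup_append hnd
            exact hdis (List.mem_map_of_mem hc) (by
              simpa [List.mem_reverse] using hmem)
          have hmemrev : (F.getLast hFne).1 ∈ Q.reverse.map Prod.fst := by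
            rw [hQmapsplit]; exact List.mem_append_right _ (List.mem_cons_self)
          have hrem : PySem.List.remove? (Q.reverse.map Prod.fst) (F.getLast hFne).1
              = some ((F.dropLast ++ G).reverse.map Prod.fst) := by
            rw [PySem.List.remove?_eq_some_erase _ _ hmemrev]
            congr 1
            rw [hQmapsplit, List.erase_append_right _ hnotinG, List.erase_cons_head,
              List.reverse_append, List.map_append]
          have hgetD : d.getD (F.getLast hFne).1 0 = (F.getLast hFne).2 := hcons _ hcQ
          -- invariants for the shrunken pool
          have hsub : (F.dropLast ++ G).Sublist Q := by
            rw [← hFG]; exact (List.dropLast_sublist F).append (List.Sublist.refl G)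
          have hlenFG : F.length + G.length = Q.length := by
            rw [← List.length_append, hFG]
          have hFpos : 0 < F.length := List.length_pos_of_ne_nil hFne
          have hlen' : (F.dropLast ++ G).length ≤ m := by
            simp only [List.length_append, List.length_dropLast]
            omega
          have ih' := ih (F.dropLast ++ G) (names ++ [(F.getLast hFne).1])
            (tw + (F.getLast hFne).2) a b hlen'
            (by simp only [List.length_append, List.length_dropLast]; omega)
            (by simp only [List.length_append, List.length_dropLast]; omega)
            (hasc.sublist hsub)
            (fun p hp => hcons p (hsub.subset hp)) (hnodup.sublist (hsub.map Prod.fst))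
          rw [pvInnerA, if_pos htw]
          split
          · rename_i c hf
            rw [hfindsome] at hf
            have hceq : c = (F.getLast hFne).1 := (Option.some.inj hf).symm
            subst hceq
            split
            · rename_i rest hr
              rw [hrem] at hr
              have hrest : rest = (F.dropLast ++ G).reverse.map Prod.fst := (Option.some.inj hr).symm
              subst hrest
              rw [hgetD, ih']
              rw [show limit - (tw + (F.getLast hFne).2) = (limit - tw) - (F.getLast hFne).2 by omega]
              rw [← pv_innerB_pick limit (limit - tw) names b F G hcap hF hG hFne, hFG]
            · rename_i hr
              rw [hrem] at hr
              cases hr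
          · rename_i hf
            rw [hfindsome] at hf
            cases hf
      · -- the trip is weight-complete on both sides
        rw [pvInnerA, if_neg htw, pvInnerB, if_neg (by omega)]

-- MAIN outer lemma: the trip loops agree
theorem pv_outer_eq (d : PySem.Dict String Int) (limit : Int) (h0 : 0 < limit) :
    ∀ (n : Nat) (Q : List (String × Int)) (acc : List (List String)) (fA fB : Nat),
    Q.length ≤ n → Q.length ≤ fA → Q.length ≤ fB →
    Q.Pairwise (fun a b => a.2 ≤ b.2) →
    (∀ p ∈ Q, d.getD p.1 0 = p.2) →
    (Q.map Prod.fst).Nodup →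
    (∀ p ∈ Q, p.2 ≤ limit) →
    pvOuterA d limit fA (Q.reverse.map Prod.fst) acc = pvOuterB limit fB Q acc := by
  intro n
  induction n with
  | zero =>
    intro Q acc fA fB hlen _ _ _ _ _ _
    have hQ : Q = [] := List.length_eq_zero_iff.mp (Nat.le_zero.mp hlen)
    subst hQ
    cases fA <;> cases fB <;> simp [pvOuterA, pvOuterB]
  | succ m ih =>
    intro Q acc fA fB hlen hfA hfB hasc hcons hnodup hw
    by_cases hQ : Q = []
    · subst hQ
      cases fA <;> cases fB <;> simp [pvOuterA, pvOuterB]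
    · have hQpos : 0 < Q.length := List.length_pos_of_ne_nil hQ
      obtain ⟨a, rfl⟩ : ∃ a, fA = a + 1 := ⟨fA - 1, by omega⟩
      obtain ⟨b, rfl⟩ : ∃ b, fB = b + 1 := ⟨fB - 1, by omega⟩
      have htrip := pv_trip_eq d limit Q.length Q [] 0 Q.length Q.length
        (Nat.le_refl _) (Nat.le_refl _) (Nat.le_refl _) hasc hcons hnodup
      rw [Int.sub_zero] at htrip
      -- the first trip of a nonempty pool loads at least one cow
      have hFne : Q.takeWhile (fun p => decide (p.2 ≤ limit)) ≠ [] := by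
        cases Q with
        | nil => exact absurd rfl hQ
        | cons q t =>
          rw [List.takeWhile_cons_of_pos (by simpa using hw q List.mem_cons_self)]
          exact List.cons_ne_nil _ _
      have hne1 : (pvInnerB limit Q.length Q [] limit).1 ≠ [] := by
        have hFG : Q.takeWhile (fun p => decide (p.2 ≤ limit))
            ++ Q.dropWhile (fun p => decide (p.2 ≤ limit)) = Q := List.takeWhile_append_dropWhile
        obtain ⟨q0, hq0⟩ : ∃ q0, Q.length = q0 + 1 := ⟨Q.length - 1, by omega⟩
        rw [hq0]
        have hpick := pv_innerB_pick limit limit [] q0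
          (Q.takeWhile (fun p => decide (p.2 ≤ limit)))
          (Q.dropWhile (fun p => decide (p.2 ≤ limit)))
          h0 (fun p hp => by have := List.mem_takeWhile_imp hp; simpa using this)
          (pv_dropWhile_gt limit Q hasc) hFne
        rw [hFG] at hpick
        rw [hpick]
        obtain ⟨t, ht⟩ := pv_innerB_names_prefix limit q0 _ _ _
        rw [ht]
        simp
      have hlenB := pvInnerB_len limit Q.length Q [] limit (Nat.le_refl _)
      simp only [List.length_nil, Nat.zero_add] at hlenB
      have hpos : 0 < (pvInnerB limit Q.length Q [] limit).1.length := List.length_pos_of_ne_nil hne1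
      have hshort : (pvInnerB limit Q.length Q [] limit).2.length < Q.length := by omega
      -- A side
      rw [pvOuterA]
      rw [if_pos (by simpa using hQpos)]
      have hlenmap : (Q.reverse.map Prod.fst).length = Q.length := by simp
      rw [hlenmap, htrip]
      simp only []
      -- B side
      conv_rhs => rw [pvOuterB]
      rw [if_neg hQ]
      have hpair : pvInnerB limit Q.length Q [] limit
          = ((pvInnerB limit Q.length Q [] limit).1, (pvInnerB limit Q.length Q [] limit).2) := rfl
      conv_rhs => rw [hpair]
      simp only []
      rw [if_neg hne1]
      -- recurse
      have hsub := pv_innerB_sublist limit Q.length Q [] limit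
      exact ih (pvInnerB limit Q.length Q [] limit).2 (acc ++ [(pvInnerB limit Q.length Q [] limit).1])
        a b (by omega) (by omega) (by omega) (hasc.sublist hsub) (fun p hp => hcons p (hsub.subset hp))
        (hnodup.sublist (hsub.map Prod.fst)) (fun p hp => hw p (hsub.subset hp))

-- ===== VERDICT (by name: the statement is the Claim_ definition above) =====
theorem greedy_cow_transport_spec : Claim_equal_greedy_cow_transport := by
  intro cows limit _hdom hpre
  obtain ⟨hn, hcase⟩ := hpre
  unfold Spec_greedy_cow_transport greedy_cow_transport greedy_cow_transport_alt
  show pvOuterA (PySem.Dict.mk cows) limit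
      (PySem.List.sorted (PySem.Dict.mk cows).keys (fun c => (PySem.Dict.mk cows).getD c 0) true).length
      (PySem.List.sorted (PySem.Dict.mk cows).keys (fun c => (PySem.Dict.mk cows).getD c 0) true) []
    = pvOuterB limit ((PySem.List.sorted cows (fun item => item.2) true).reverse).length
      ((PySem.List.sorted cows (fun item => item.2) true).reverse) []
  have hkeys : (PySem.Dict.mk cows).keys = cows.map Prod.fst := rfl
  have hcons : ∀ p ∈ cows, (PySem.Dict.mk cows).getD p.1 0 = p.2 := by
    intro p hp
    exact PySem.Dict.getD_of_mem_items (PySem.Dict.mk cows) hp (by rw [hkeys]; exact hn) 0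
  have hsorted : PySem.List.sorted (PySem.Dict.mk cows).keys
        (fun c => (PySem.Dict.mk cows).getD c 0) true
      = (PySem.List.sorted cows (fun p => p.2) true).map Prod.fst := by
    rw [hkeys]
    exact pv_sorted_fst cows _ hcons
  rcases hcase with rfl | ⟨h0, hw⟩
  · simp [PySem.List.sorted, pvOuterA, pvOuterB]
  · have hQperm : ((PySem.List.sorted cows (fun p => p.2) true).reverse).Perm cows :=
      (List.reverse_perm _).trans (PySem.List.sorted_perm cows _ true)
    rw [hsorted]
    conv_lhs => rw [← List.reverse_reverse (PySem.List.sorted cows (fun p => p.2) true)]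
    exact pv_outer_eq (PySem.Dict.mk cows) limit h0
      ((PySem.List.sorted cows (fun p => p.2) true).reverse).length
      ((PySem.List.sorted cows (fun p => p.2) true).reverse) []
      ((((PySem.List.sorted cows (fun p => p.2) true).reverse).reverse).map Prod.fst).length
      ((PySem.List.sorted cows (fun p => p.2) true).reverse).length
      (Nat.le_refl _) (by simp) (Nat.le_refl _)
      (List.pairwise_reverse.mpr (by
        simpa using PySem.List.sorted_pairwise_rev cows (fun p : String × Int => p.2)))
      (fun p hp => hcons p (hQperm.subset hp))
      ((hQperm.map Prod.fst).nodup_iff.mpr hn)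
      (fun p hp => hw p (hQperm.subset hp))
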